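-- pv_equiv track=rewrite | github.com/Themaoqiu/DORO-STVG | graph_generator/modules/query_generator_cpsat.py | _enumerate_ordered_chains
-- ===== SOURCE A (Python) =====
-- from typing import Any, Callable, Dict, Iterable, List, Optional, Set, Tuple, Union
--
-- def _enumerate_ordered_chains(
--     events: List[Tuple[int, int, str]],
--     max_chain_len: int,
--     max_chains: int = 128,
-- ) -> Set[Tuple[str, ...]]:
--     if max_chain_len < 2 or len(events) < 2:
--         return set()
--     sorted_events = sorted(events, key=lambda x: (x[0], x[1], x[2]))
--     out: Set[Tuple[str, ...]] = set()
--
--     def dfs(last_idx: int, chain: List[str]) -> None: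
--         if len(out) >= max_chains:
--             return
--         if 2 <= len(chain) <= max_chain_len:
--             out.add(tuple(chain))
--         if len(chain) >= max_chain_len:
--             return
--         last_end = sorted_events[last_idx][1]
--         for j in range(last_idx + 1, len(sorted_events)):
--             s, e, token = sorted_events[j]
--             if s <= last_end:
--                 continue
--             if token == chain[-1]:
--                 continue
--             chain.append(token)
--             dfs(j, chain)
--             chain.pop()
--             if len(out) >= max_chains:
--                 return
--
--     for i in range(len(sorted_events)):
--         dfs(i, [sorted_events[i][2]])
--         if len(out) >= max_chains:
--             break
--     return out
-- ===== SOURCE B (Python) =====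
-- from typing import List, Set, Tuple
--
-- def _enumerate_ordered_chains(
--     events: List[Tuple[int, int, str]],
--     max_chain_len: int,
--     max_chains: int = 128,
-- ) -> Set[Tuple[str, ...]]:
--     if max_chain_len < 2 or len(events) < 2:
--         return set()
--     ev = sorted(events, key=lambda x: (x[0], x[1], x[2]))
--     n = len(ev)
--     out: Set[Tuple[str, ...]] = set()
--     # explicit-stack preorder DFS; seeds pushed in reverse so smaller i is on top
--     stack = [(i, (ev[i][2],)) for i in range(n - 1, -1, -1)]
--     while stack:
--         last_idx, chain = stack.pop()
--         if len(out) >= max_chains: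
--             break
--         if 2 <= len(chain) <= max_chain_len:
--             out.add(chain)
--         if len(chain) >= max_chain_len:
--             continue
--         last_end = ev[last_idx][1]
--         # push extensions in reverse index order so they pop in ascending order
--         for j in range(n - 1, last_idx, -1):
--             s, e, tok = ev[j]
--             if s > last_end and tok != chain[-1]:
--                 stack.append((j, chain + (tok,)))
--     return out
-- ===== Notes on version B (the rewrite author's own statement) =====
-- stated objective: alternative
-- what changed: The shared-mutable-set recursive DFS (inner dfs closure with per-level early returns and a seed loop with break) is replaced by a single explicit-stack iterative preorder DFS: all seeds are pushed once, states are popped and their valid extensions pushed in reverse index order, and one cap check at pop time replaces the recursion's scattered cap returns.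
import Mathlib
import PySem

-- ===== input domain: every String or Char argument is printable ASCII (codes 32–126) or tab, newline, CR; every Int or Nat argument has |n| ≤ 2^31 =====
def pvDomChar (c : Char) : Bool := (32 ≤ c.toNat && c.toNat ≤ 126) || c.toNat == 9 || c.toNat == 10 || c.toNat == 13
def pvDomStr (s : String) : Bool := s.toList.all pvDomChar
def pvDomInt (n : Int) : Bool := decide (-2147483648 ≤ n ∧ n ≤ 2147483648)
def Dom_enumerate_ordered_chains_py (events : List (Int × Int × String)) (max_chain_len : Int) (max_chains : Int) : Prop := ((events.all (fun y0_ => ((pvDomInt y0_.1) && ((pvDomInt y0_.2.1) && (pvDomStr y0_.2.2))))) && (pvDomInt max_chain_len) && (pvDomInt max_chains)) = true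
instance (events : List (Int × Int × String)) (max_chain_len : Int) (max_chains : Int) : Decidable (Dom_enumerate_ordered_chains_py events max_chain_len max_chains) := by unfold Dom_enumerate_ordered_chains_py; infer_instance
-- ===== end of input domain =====

-- B replaces A's shared-mutable-set recursive DFS by a single explicit-stack iterative
-- preorder DFS (alternative decomposition, same asymptotic cost).

-- ===== PORT A =====
-- sorted(events, key=lambda x: (x[0], x[1], x[2])): Python's stable sort with a tuple key,
-- realized as three stable single-key passes (last key first) — exact for a stable sort.
-- Shared by both ports (both Pythons sort identically).
def pvSortEvents (events : List (Int × Int × String)) : List (Int × Int × String) :=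
  PySem.List.sorted (PySem.List.sorted (PySem.List.sorted events (fun x => x.2.2)) (fun x => x.2.1)) (fun x => x.1)

-- A's inner `dfs(last_idx, chain)` and its `for j in range(last_idx+1, n)` loop.
-- The pair (last_idx, sorted_events) is carried as lastEnd = sorted_events[last_idx][1]
-- plus rest = the suffix of sorted_events after position last_idx (same values, same order).
-- chain[-1] is chain.getLastD "" (chain is always nonempty).
mutual
def pvDfsA (maxLen maxC : Int) (chain : List String) (lastEnd : Int)
    (rest : List (Int × Int × String)) (out : PySem.Set (List String)) : PySem.Set (List String) :=
  if maxC ≤ (out.length : Int) then out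
  else
    let out1 := if 2 ≤ chain.length ∧ (chain.length : Int) ≤ maxLen then PySem.Set.add out chain else out
    if maxLen ≤ (chain.length : Int) then out1
    else pvLoopA maxLen maxC chain lastEnd rest out1
termination_by (rest.length, 1)

def pvLoopA (maxLen maxC : Int) (chain : List String) (lastEnd : Int)
    (rest : List (Int × Int × String)) (out : PySem.Set (List String)) : PySem.Set (List String) :=
  match rest with
  | [] => out
  | (s, e, tok) :: r =>
    if s ≤ lastEnd then pvLoopA maxLen maxC chain lastEnd r out
    else if tok = chain.getLastD "" then pvLoopA maxLen maxC chain lastEnd r out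
    else
      let out' := pvDfsA maxLen maxC (chain ++ [tok]) e r out
      if maxC ≤ (out'.length : Int) then out'
      else pvLoopA maxLen maxC chain lastEnd r out'
termination_by (rest.length, 0)
end

-- A's top-level `for i in range(len(sorted_events)): dfs(i, [token_i]); if cap: break`.
def pvTopA (maxLen maxC : Int) : List (Int × Int × String) → PySem.Set (List String) → PySem.Set (List String)
  | [], out => out
  | (_, e, tok) :: r, out =>
    let out' := pvDfsA maxLen maxC [tok] e r out
    if maxC ≤ (out'.length : Int) then out' else pvTopA maxLen maxC r out'

def enumerate_ordered_chains_py (events : List (Int × Int × String)) (max_chain_len : Int) (max_chains : Int) : List (List String) :=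
  if max_chain_len < 2 ∨ (events.length : Int) < 2 then []
  else pvTopA max_chain_len max_chains (pvSortEvents events) []

-- ===== PORT B =====
-- B's stack states are (last_end, chain, suffix after last_idx) for Python's (last_idx, chain);
-- the Lean list's head is the Python stack's top, so Python's reverse-order appends are a
-- forward-order prepend of the extension list.
def pvPushB (chain : List String) (lastEnd : Int) :
    List (Int × Int × String) → List (Int × List String × List (Int × Int × String))
  | [] => []
  | (s, e, tok) :: r =>
    if lastEnd < s ∧ ¬ tok = chain.getLastD "" then (e, chain ++ [tok], r) :: pvPushB chain lastEnd r
    else pvPushB chain lastEnd r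

-- B's initial stack `[(i, (ev[i][2],)) for i in range(n-1, -1, -1)]` (top = i = 0).
def pvSeedsB : List (Int × Int × String) → List (Int × List String × List (Int × Int × String))
  | [] => []
  | (_, e, tok) :: r => (e, [tok], r) :: pvSeedsB r

-- B's `while stack:` loop. Python runs until the stack empties (or the cap break);
-- the fuel only bounds the iteration count — pvLoopB_eq below shows 3^(n+1) never runs out.
def pvLoopB (maxLen maxC : Int) : Nat → List (Int × List String × List (Int × Int × String)) → PySem.Set (List String) → PySem.Set (List String)
  | 0, _, out => out
  | _ + 1, [], out => out
  | fuel + 1, (lastEnd, chain, rest) :: stk, out =>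
    if maxC ≤ (out.length : Int) then out
    else
      let out1 := if 2 ≤ chain.length ∧ (chain.length : Int) ≤ maxLen then PySem.Set.add out chain else out
      if maxLen ≤ (chain.length : Int) then pvLoopB maxLen maxC fuel stk out1
      else pvLoopB maxLen maxC fuel (pvPushB chain lastEnd rest ++ stk) out1

def enumerate_ordered_chains_py_alt (events : List (Int × Int × String)) (max_chain_len : Int) (max_chains : Int) : List (List String) :=
  if max_chain_len < 2 ∨ (events.length : Int) < 2 then []
  else
    let ev := pvSortEvents events
    pvLoopB max_chain_len max_chains (3 ^ (ev.length + 1)) (pvSeedsB ev) []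

-- ===== PRECONDITION & SPEC =====
def Spec_enumerate_ordered_chains_py (events : List (Int × Int × String)) (max_chain_len : Int) (max_chains : Int) (out : List (List String)) : Prop := out = enumerate_ordered_chains_py_alt events max_chain_len max_chains
instance (events : List (Int × Int × String)) (max_chain_len : Int) (max_chains : Int) (out : List (List String)) : Decidable (Spec_enumerate_ordered_chains_py events max_chain_len max_chains out) := by unfold Spec_enumerate_ordered_chains_py; infer_instance

-- ===== CLAIM (what is proved, stated in full; the proofs are below) =====
def Claim_equal_enumerate_ordered_chains_py : Prop := ∀ (events : List (Int × Int × String)) (max_chain_len : Int) (max_chains : Int), Dom_enumerate_ordered_chains_py events max_chain_len max_chains → Spec_enumerate_ordered_chains_py events max_chain_len max_chains (enumerate_ordered_chains_py events max_chain_len max_chains)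

-- ===== LEMMAS AND PROOFS =====

-- Folding A's dfs over a list of B-states, left to right.
def pvFold (maxLen maxC : Int) (stk : List (Int × List String × List (Int × Int × String)))
    (out : PySem.Set (List String)) : PySem.Set (List String) :=
  stk.foldl (fun o st => pvDfsA maxLen maxC st.2.1 st.1 st.2.2 o) out

-- Stack measure: each state costs 3^(|rest|+1).
def pvM (stk : List (Int × List String × List (Int × Int × String))) : Nat :=
  (stk.map (fun st => 3 ^ (st.2.2.length + 1))).sum

lemma pvDfsA_capped (maxLen maxC : Int) (chain : List String) (lastEnd : Int)
    (rest : List (Int × Int × String)) (out : PySem.Set (List String))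
    (h : maxC ≤ (out.length : Int)) :
    pvDfsA maxLen maxC chain lastEnd rest out = out := by
  rw [pvDfsA]; simp [h]

lemma pvFold_capped (maxLen maxC : Int) (stk : List (Int × List String × List (Int × Int × String)))
    (out : PySem.Set (List String)) (h : maxC ≤ (out.length : Int)) :
    pvFold maxLen maxC stk out = out := by
  induction stk with
  | nil => rfl
  | cons st stk ih => simp [pvFold, List.foldl_cons, pvDfsA_capped _ _ _ _ _ _ h] at ih ⊢; exact ih

lemma pvLoopA_eq (maxLen maxC : Int) (chain : List String) (lastEnd : Int)
    (rest : List (Int × Int × String)) (out : PySem.Set (List String)) :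
    pvLoopA maxLen maxC chain lastEnd rest out = pvFold maxLen maxC (pvPushB chain lastEnd rest) out := by
  induction rest generalizing out with
  | nil => rw [pvLoopA]; rfl
  | cons ev r ih =>
    obtain ⟨s, e, tok⟩ := ev
    rw [pvLoopA, pvPushB]
    by_cases hs : s ≤ lastEnd
    · have hnc : ¬ (lastEnd < s ∧ ¬ tok = chain.getLastD "") := by
        rintro ⟨h1, _⟩; omega
      rw [if_pos hs, if_neg hnc]
      exact ih out
    · by_cases ht : tok = chain.getLastD ""
      · have hnc : ¬ (lastEnd < s ∧ ¬ tok = chain.getLastD "") := by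
          rintro ⟨_, h2⟩; exact h2 ht
        rw [if_neg hs, if_pos ht, if_neg hnc]
        exact ih out
      · have hc : lastEnd < s ∧ ¬ tok = chain.getLastD "" := ⟨by omega, ht⟩
        rw [if_neg hs, if_neg ht, if_pos hc]
        have hfold : pvFold maxLen maxC ((e, chain ++ [tok], r) :: pvPushB chain lastEnd r) out
            = pvFold maxLen maxC (pvPushB chain lastEnd r) (pvDfsA maxLen maxC (chain ++ [tok]) e r out) := rfl
        rw [hfold]
        by_cases hcap : maxC ≤ ((pvDfsA maxLen maxC (chain ++ [tok]) e r out).length : Int)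
        · rw [if_pos hcap, pvFold_capped _ _ _ _ hcap]
        · rw [if_neg hcap]; exact ih _

lemma pvTopA_eq (maxLen maxC : Int) (l : List (Int × Int × String)) (out : PySem.Set (List String)) :
    pvTopA maxLen maxC l out = pvFold maxLen maxC (pvSeedsB l) out := by
  induction l generalizing out with
  | nil => rfl
  | cons ev r ih =>
    obtain ⟨s, e, tok⟩ := ev
    rw [pvTopA, pvSeedsB]
    have hfold : pvFold maxLen maxC ((e, [tok], r) :: pvSeedsB r) out
        = pvFold maxLen maxC (pvSeedsB r) (pvDfsA maxLen maxC [tok] e r out) := rfl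
    rw [hfold]
    by_cases hcap : maxC ≤ ((pvDfsA maxLen maxC [tok] e r out).length : Int)
    · simp only [hcap, if_pos, pvFold_capped _ _ _ _ hcap]
    · simp only [hcap, if_neg, not_false_iff]; exact ih _

lemma pvPushB_measure (chain : List String) (lastEnd : Int) (rest : List (Int × Int × String)) :
    2 * pvM (pvPushB chain lastEnd rest) + 3 ≤ 3 ^ (rest.length + 1) := by
  induction rest with
  | nil => simp [pvM, pvPushB]
  | cons ev r ih =>
    obtain ⟨s, e, tok⟩ := ev
    rw [pvPushB]
    have hpow : (3:Nat) ^ (r.length + 1 + 1) = 3 * 3 ^ (r.length + 1) := by ring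
    split_ifs with h
    · have : pvM ((e, chain ++ [tok], r) :: pvPushB chain lastEnd r)
          = 3 ^ (r.length + 1) + pvM (pvPushB chain lastEnd r) := by
        simp [pvM]
      simp only [List.length_cons, this, hpow]; omega
    · simp only [List.length_cons, hpow]; omega

lemma pvSeedsB_measure (l : List (Int × Int × String)) :
    2 * pvM (pvSeedsB l) + 3 ≤ 3 ^ (l.length + 1) := by
  induction l with
  | nil => simp [pvM, pvSeedsB]
  | cons ev r ih =>
    obtain ⟨s, e, tok⟩ := ev
    have : pvM (pvSeedsB ((s, e, tok) :: r)) = 3 ^ (r.length + 1) + pvM (pvSeedsB r) := by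
      simp [pvM, pvSeedsB]
    rw [this]
    have hpow : (3:Nat) ^ (r.length + 1 + 1) = 3 * 3 ^ (r.length + 1) := by ring
    simp only [List.length_cons, hpow]; omega

lemma pvM_append (a b : List (Int × List String × List (Int × Int × String))) :
    pvM (a ++ b) = pvM a + pvM b := by
  simp [pvM]

lemma pvLoopB_eq (maxLen maxC : Int) (fuel : Nat) :
    ∀ (stk : List (Int × List String × List (Int × Int × String))) (out : PySem.Set (List String)),
      pvM stk < fuel →
      pvLoopB maxLen maxC fuel stk out = pvFold maxLen maxC stk out := by
  induction fuel with
  | zero => intro stk out h; omega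
  | succ fuel ih =>
    intro stk out h
    match stk with
    | [] => rfl
    | (lastEnd, chain, rest) :: stk' =>
      have hM : pvM ((lastEnd, chain, rest) :: stk') = 3 ^ (rest.length + 1) + pvM stk' := by
        simp [pvM]
      have hpos : 3 ≤ (3:Nat) ^ (rest.length + 1) := by
        calc (3:Nat) = 3 ^ 1 := by norm_num
        _ ≤ 3 ^ (rest.length + 1) := Nat.pow_le_pow_right (by norm_num) (by omega)
      have hfold : pvFold maxLen maxC ((lastEnd, chain, rest) :: stk') out
          = pvFold maxLen maxC stk' (pvDfsA maxLen maxC chain lastEnd rest out) := rfl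
      rw [pvLoopB, hfold]
      by_cases hcap : maxC ≤ (out.length : Int)
      · rw [if_pos hcap, pvDfsA_capped _ _ _ _ _ _ hcap, pvFold_capped _ _ _ _ hcap]
      · rw [if_neg hcap, pvDfsA]
        rw [if_neg hcap]
        by_cases hlen : maxLen ≤ (chain.length : Int)
        · simp only [hlen, if_pos]
          rw [ih stk' _ (by omega)]
        · simp only [hlen, if_neg, not_false_iff]
          have hmeas : pvM (pvPushB chain lastEnd rest ++ stk') < fuel := by
            have hp := pvPushB_measure chain lastEnd rest
            rw [pvM_append]; omega
          rw [ih _ _ hmeas]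
          simp only [pvFold, List.foldl_append]
          rw [← pvFold, ← pvFold, ← pvLoopA_eq]
          rfl

-- ===== VERDICT (by name: the statement is the Claim_ definition above) =====
theorem enumerate_ordered_chains_py_spec : Claim_equal_enumerate_ordered_chains_py := by
  intro events maxLen maxC _
  unfold Spec_enumerate_ordered_chains_py
  unfold enumerate_ordered_chains_py enumerate_ordered_chains_py_alt
  by_cases hg : maxLen < 2 ∨ (events.length : Int) < 2
  · rw [if_pos hg, if_pos hg]
  · rw [if_neg hg, if_neg hg]
    have hs := pvSeedsB_measure (pvSortEvents events)
    rw [pvLoopB_eq maxLen maxC _ _ _ (by omega)]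
    exact pvTopA_eq _ _ _ _
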